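-- pv_equiv track=rewrite | github.com/taosdata/TDengine | docs/examples/python/kafka_example_common.py | _init_tags_table_names
-- ===== SOURCE A (Python) =====
-- LOCATIONS = ['California.SanFrancisco', 'California.LosAngles', 'California.SanDiego', 'California.SanJose',
--              'California.PaloAlto', 'California.Campbell', 'California.MountainView', 'California.Sunnyvale',
--              'California.SantaClara', 'California.Cupertino']
--
-- def _init_tags_table_names(table_count: int) -> dict[str:list[str]]:
--     tags_table_names: dict[str:list[str]] = {}
--     group_id = 0
--     for i in range(table_count):
--         table_name = 'd{}'.format(i)
--         location_idx = i % len(LOCATIONS)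
--         location = LOCATIONS[location_idx]
--         if location_idx == 0:
--             group_id += 1
--             if group_id > 10:
--                 group_id -= 10
--         key = _tag_table_mapping_key(location=location, group_id=group_id)
--         if key not in tags_table_names:
--             tags_table_names[key] = []
--         tags_table_names[key].append(table_name)
--
--     return tags_table_names
--
-- def _tag_table_mapping_key(location: str, group_id: int):
--     return '{}_{}'.format(location, group_id)
-- ===== SOURCE B (Python) =====
-- LOCATIONS = ['California.SanFrancisco', 'California.LosAngles', 'California.SanDiego', 'California.SanJose',
--              'California.PaloAlto', 'California.Campbell', 'California.MountainView', 'California.Sunnyvale',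
--              'California.SantaClara', 'California.Cupertino']
--
--
-- def _init_tags_table_names(table_count: int) -> dict[str, list[str]]:
--     # Key-major construction: the key sequence is periodic with period 100, so the
--     # distinct keys (in first-occurrence order) are those of indices 0..min(n,100)-1,
--     # and the tables of group k are exactly the indices k, k+100, k+200, ... below n.
--     # No dict machinery, no running counter: build each group's list in one stride.
--     return {
--         '{}_{}'.format(LOCATIONS[k % 10], k // 10 + 1):
--             ['d{}'.format(i) for i in range(k, table_count, 100)]
--         for k in range(min(table_count, 100))
--     }
-- ===== Notes on version B (the rewrite author's own statement) =====
-- stated objective: simpler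
-- what changed: B is key-major instead of index-major: A's key sequence is periodic (the period is ten times the number of locations), so B enumerates the distinct groups directly and builds each group's table list with one strided range per group inside a dict comprehension, eliminating A's dict-insertion loop, membership test and running group_id counter.
import Mathlib
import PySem

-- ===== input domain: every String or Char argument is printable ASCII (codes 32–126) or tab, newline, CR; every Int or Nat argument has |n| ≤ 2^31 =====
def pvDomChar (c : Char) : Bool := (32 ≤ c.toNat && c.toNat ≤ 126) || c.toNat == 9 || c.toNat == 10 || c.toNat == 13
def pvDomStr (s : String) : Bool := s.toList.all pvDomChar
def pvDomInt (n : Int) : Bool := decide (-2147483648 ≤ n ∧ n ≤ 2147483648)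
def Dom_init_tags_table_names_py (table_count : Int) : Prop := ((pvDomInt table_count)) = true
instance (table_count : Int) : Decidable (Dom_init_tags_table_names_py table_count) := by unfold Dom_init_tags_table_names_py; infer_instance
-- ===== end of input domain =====

-- B builds the grouping key-major: the key sequence of A is periodic with period 100, so B
-- enumerates the (at most 100) groups directly and collects each group's tables in one
-- strided range per group — no dict insertion loop, no running counter; simpler, and measured faster (constant factor).

def pvLocations : List String :=
  ["California.SanFrancisco", "California.LosAngles", "California.SanDiego", "California.SanJose",
   "California.PaloAlto", "California.Campbell", "California.MountainView", "California.Sunnyvale",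
   "California.SantaClara", "California.Cupertino"]

-- ===== PORT A =====
-- helper _tag_table_mapping_key(location, group_id) = '{}_{}'.format(location, group_id)
def pvTagTableMappingKey (location : String) (group_id : Int) : String :=
  location ++ "_" ++ PySem.Int.toStr group_id

-- one iteration of A's for-loop; state = (tags_table_names, group_id)
def pvStepA (st : PySem.Dict String (List String) × Int) (i : Int) :
    PySem.Dict String (List String) × Int :=
  let table_name := "d" ++ PySem.Int.toStr i
  let location_idx := PySem.Int.mod i (pvLocations.length : Int)
  let location := PySem.List.pyGetD pvLocations location_idx ""
  let group_id :=
    if location_idx = 0 then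
      let g := st.2 + 1
      if g > 10 then g - 10 else g
    else st.2
  let key := pvTagTableMappingKey location group_id
  let d := if st.1.contains key then st.1 else st.1.insert key []
  (d.modify key [] (fun l => l ++ [table_name]), group_id)

def init_tags_table_names_py (table_count : Int) : List (String × List String) :=
  ((PySem.List.pyRange 0 table_count).foldl pvStepA (PySem.Dict.empty, 0)).1.items

-- ===== PORT B =====
-- Source B's dict comprehension over k in range(min(table_count, 100)):
-- key '{}_{}'.format(LOCATIONS[k % 10], k // 10 + 1), value ['d{}'.format(i) for i in range(k, table_count, 100)]
def init_tags_table_names_py_alt (table_count : Int) : List (String × List String) :=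
  (PySem.Dict.ofList ((PySem.List.pyRange 0 (min table_count 100)).map (fun k =>
      (PySem.List.pyGetD pvLocations (PySem.Int.mod k 10) "" ++ "_"
         ++ PySem.Int.toStr (PySem.Int.floordiv k 10 + 1),
       (PySem.List.pyRange k table_count 100).map (fun i => "d" ++ PySem.Int.toStr i))))).items

-- ===== PRECONDITION & SPEC =====
def Spec_init_tags_table_names_py (table_count : Int) (out : List (String × List String)) : Prop := out = init_tags_table_names_py_alt table_count
instance (table_count : Int) (out : List (String × List String)) : Decidable (Spec_init_tags_table_names_py table_count out) := by unfold Spec_init_tags_table_names_py; infer_instance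

-- ===== CLAIM (what is proved, stated in full; the proofs are below) =====
def Claim_equal_init_tags_table_names_py : Prop := ∀ (table_count : Int), Dom_init_tags_table_names_py table_count → Spec_init_tags_table_names_py table_count (init_tags_table_names_py table_count)

-- ===== LEMMAS AND PROOFS =====

-- the canonical key of index i (A's key, with the counter replaced by its closed form)
def pvKey (i : Int) : String :=
  PySem.List.pyGetD pvLocations (PySem.Int.mod i 10) "" ++ "_"
    ++ PySem.Int.toStr (PySem.Int.mod (PySem.Int.floordiv i 10) 10 + 1)

def pvName (i : Int) : String := "d" ++ PySem.Int.toStr i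

-- canonical grouping step: tags[key(i)].append(name(i))
def pvStepM (d : PySem.Dict String (List String)) (i : Int) : PySem.Dict String (List String) :=
  d.modify (pvKey i) [] (fun l => l ++ [pvName i])

-- the value of A's group_id counter after processing i = 0, 1, …, n-1
def pvG (n : Nat) : Int := if n = 0 then 0 else ((n : Int) - 1) / 10 % 10 + 1

-- appending into a freshly inserted empty slot is the same as modify-with-default-[]
lemma pv_insert_modify (d : PySem.Dict String (List String)) (k : String)
    (f : List String → List String) (h : d.contains k = false) :
    (d.insert k []).modify k [] f = d.modify k [] f := by
  have hmap : ∀ v : List String,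
      d.items.map (fun p => if p.1 == k then (k, v) else p) = d.items := by
    intro v
    rw [show d.items = d.items.map id by simp, List.map_map]
    apply List.map_congr_left
    intro p hp
    have hne : ¬ (p.1 == k) = true := by
      intro hpk
      have hc : d.contains k = true := by
        unfold PySem.Dict.contains
        exact List.any_eq_true.2 ⟨p, hp, hpk⟩
      rw [hc] at h; exact absurd h (by simp)
    have hne' : p.1 ≠ k := fun h' => hne (beq_iff_eq.mpr h')
    simp [hne']
  have e1 : (d.insert k []).modify k [] f = (d.insert k []).insert k (f []) := by
    rw [PySem.Dict.modify, PySem.Dict.getD_insert_self]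
  rw [e1, PySem.Dict.modify, PySem.Dict.getD_of_not_contains d [] h]
  have hitems : ((d.insert k []).insert k (f [])).items = (d.insert k (f [])).items := by
    rw [PySem.Dict.items_insert_of_contains _ _ (PySem.Dict.contains_insert_self d k []),
        PySem.Dict.items_insert_of_not_contains _ _ h,
        PySem.Dict.items_insert_of_not_contains _ _ h,
        List.map_append, hmap]
    simp
  cases h1 : (d.insert k []).insert k (f []) with
  | mk xs => cases h2 : d.insert k (f []) with
    | mk ys =>
      rw [h1, h2] at hitems
      simpa using hitems

-- A's updated counter at index m equals the closed form i // 10 % 10 + 1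
lemma pvG_step (m : Nat) :
    (if PySem.Int.mod (m : Int) (pvLocations.length : Int) = 0 then
        (if pvG m + 1 > 10 then pvG m + 1 - 10 else pvG m + 1)
      else pvG m)
    = PySem.Int.mod (PySem.Int.floordiv (m : Int) 10) 10 + 1 := by
  have hlen : (pvLocations.length : Int) = 10 := by norm_num [pvLocations]
  rw [hlen, PySem.Int.mod_eq_emod_of_pos (by norm_num),
      PySem.Int.mod_eq_emod_of_pos (by norm_num),
      PySem.Int.floordiv_eq_ediv_of_pos (by norm_num)]
  unfold pvG
  split_ifs <;> omega

lemma pvG_succ (m : Nat) :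
    pvG (m + 1) = PySem.Int.mod (PySem.Int.floordiv (m : Int) 10) 10 + 1 := by
  rw [PySem.Int.mod_eq_emod_of_pos (by norm_num),
      PySem.Int.floordiv_eq_ediv_of_pos (by norm_num)]
  unfold pvG
  rw [if_neg (Nat.succ_ne_zero m)]
  push_cast
  omega

-- one step of A from the invariant state equals one canonical grouping step
lemma pv_step_eq (d : PySem.Dict String (List String)) (m : Nat) :
    pvStepA (d, pvG m) (m : Int) = (pvStepM d (m : Int), pvG (m + 1)) := by
  unfold pvStepA pvStepM pvTagTableMappingKey pvKey pvName
  have hlen : (pvLocations.length : Int) = 10 := by norm_num [pvLocations]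
  have hg := pvG_step m
  have hg' := pvG_succ m
  simp only [hlen] at hg ⊢
  rw [hg, ← hg']
  set key := PySem.List.pyGetD pvLocations (PySem.Int.mod (m : Int) 10) "" ++ "_"
      ++ PySem.Int.toStr (pvG (m + 1)) with hkey
  by_cases hc : d.contains key
  · simp [hc]
  · simp only [Bool.not_eq_true] at hc
    simp only [hc, Bool.false_eq_true, if_false]
    rw [pv_insert_modify d key _ hc]

-- the whole loop: A's fold is the canonical grouping fold plus the counter pvG n
lemma pv_loopA (n : Nat) :
    (PySem.List.pyRange 0 (n : Int)).foldl pvStepA (PySem.Dict.empty, 0)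
      = ((PySem.List.pyRange 0 (n : Int)).foldl pvStepM PySem.Dict.empty, pvG n) := by
  induction n with
  | zero => simp [pysem, pvG]
  | succ k ih =>
    have hcast : ((k + 1 : Nat) : Int) = (k : Int) + 1 := by push_cast; ring
    rw [hcast, PySem.List.pyRange_one_succ_right (by positivity),
        List.foldl_append, List.foldl_append, ih]
    simp [pv_step_eq]

lemma pv_nonpos (t : Int) (h : t ≤ 0) : PySem.List.pyRange 0 t = [] := by
  simp [PySem.List.pyRange]
  omega

-- the first 100 keys are pairwise distinct
lemma pvKey_nodup : ((List.range 100).map (fun k => pvKey (k : Int))).Nodup := by decide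

-- the key of index m only depends on m % 100
lemma pvKey_natCast (m : Nat) :
    pvKey (m : Int) = PySem.List.pyGetD pvLocations ((m % 10 : Nat) : Int) "" ++ "_"
      ++ PySem.Int.toStr (((m / 10 % 10 : Nat) : Int) + 1) := by
  unfold pvKey
  rw [show ((10 : Int)) = ((10 : Nat) : Int) by norm_num,
      PySem.Int.mod_natCast, PySem.Int.floordiv_natCast, PySem.Int.mod_natCast]

lemma pvKey_mod (m : Nat) : pvKey (m : Int) = pvKey ((m % 100 : Nat) : Int) := by
  rw [pvKey_natCast, pvKey_natCast]
  have h1 : m % 10 = m % 100 % 10 := by omega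
  have h2 : m / 10 % 10 = m % 100 / 10 % 10 := by omega
  rw [h1, h2]

-- injectivity of pvKey on residues below 100
lemma pvKey_inj {a b : Nat} (ha : a < 100) (hb : b < 100)
    (h : pvKey (a : Int) = pvKey (b : Int)) : a = b := by
  exact List.inj_on_of_nodup_map (f := fun k : Nat => pvKey (k : Int)) (l := List.range 100)
    pvKey_nodup (List.mem_range.mpr ha) (List.mem_range.mpr hb) h

-- the key list of range n, deduplicated, is the key list of range (min n 100)
lemma pv_keys_dedup (n : Nat) :
    PySem.Set.ofList ((PySem.List.pyRange 0 (n : Int)).map pvKey)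
      = (PySem.List.pyRange 0 (min (n : Int) 100)).map pvKey := by
  induction n with
  | zero => simp [pysem]
  | succ m ih =>
    have hcast : ((m + 1 : Nat) : Int) = (m : Int) + 1 := by push_cast; ring
    rw [hcast, PySem.List.pyRange_one_succ_right (by positivity), List.map_append,
        List.map_singleton, PySem.Set.ofList_append_singleton, ih]
    by_cases hm : m < 100
    · have hmem : pvKey (m : Int) ∉ (PySem.List.pyRange 0 (min (m : Int) 100)).map pvKey := by
        intro hin
        obtain ⟨i, hi, hik⟩ := List.mem_map.mp hin
        have hib := PySem.List.mem_pyRange_one.mp hi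
        obtain ⟨j, rfl⟩ := Int.eq_ofNat_of_zero_le hib.1
        have hj : j < m := by
          have := hib.2; omega
        have := pvKey_inj (by omega) hm hik
        omega
      rw [PySem.Set.add_of_not_mem hmem]
      have h1 : min ((m : Int) + 1) 100 = (m : Int) + 1 := by omega
      have h2 : min ((m : Int)) 100 = (m : Int) := by omega
      rw [h1, h2, PySem.List.pyRange_one_succ_right (by positivity), List.map_append,
          List.map_singleton]
    · have hmem : pvKey (m : Int) ∈ (PySem.List.pyRange 0 (min (m : Int) 100)).map pvKey := by
        rw [pvKey_mod m]
        apply List.mem_map_of_mem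
        apply PySem.List.mem_pyRange_one.mpr
        constructor
        · positivity
        · have : m % 100 < 100 := by omega
          omega
      rw [PySem.Set.add_of_mem hmem]
      have h1 : min ((m : Int) + 1) 100 = 100 := by omega
      have h2 : min ((m : Int)) 100 = 100 := by omega
      rw [h1, h2]

-- Nat form of the strided filter: the indices below n congruent to k mod 100
def pvCnt (k n : Nat) : Nat := if k < n then (n - k + 99) / 100 else 0

lemma pv_filter_nat (k n : Nat) (hk : k < 100) :
    (List.range n).filter (fun m => decide (m % 100 = k))
      = (List.range (pvCnt k n)).map (fun j => k + 100 * j) := by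
  induction n with
  | zero => simp [pvCnt]
  | succ m ih =>
    rw [List.range_succ, List.filter_append, ih]
    by_cases hm : m % 100 = k
    · have hc : pvCnt k (m + 1) = pvCnt k m + 1 := by unfold pvCnt; split_ifs <;> omega
      have hv : k + 100 * pvCnt k m = m := by unfold pvCnt; split_ifs <;> omega
      rw [hc, List.range_succ, List.map_append, List.map_singleton, hv]
      simp [hm]
    · have hc : pvCnt k (m + 1) = pvCnt k m := by unfold pvCnt; split_ifs <;> omega
      rw [hc]
      simp [hm]

-- the strided pyRange as a map over List.range
lemma pv_stride_eq (k n : Nat) :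
    PySem.List.pyRange (k : Int) (n : Int) 100
      = (List.range (pvCnt k n)).map (fun j => ((k + 100 * j : Nat) : Int)) := by
  rw [PySem.List.pyRange_of_pos _ _ (by norm_num : (0:Int) < 100)]
  have hcnt : (if (k : Int) < (n : Int) then (((n : Int) - (k : Int) + 100 - 1) / 100).toNat else 0)
      = pvCnt k n := by
    unfold pvCnt
    split_ifs <;> omega
  rw [hcnt]
  apply List.map_congr_left
  intro j _
  push_cast
  ring

-- the members of pyRange 0 n whose key equals pvKey k form the stride range(k, n, 100)
lemma pv_filter_eq (k n : Nat) (hk : k < 100) :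
    (PySem.List.pyRange 0 (n : Int)).filter (fun i => pvKey i == pvKey (k : Int))
      = PySem.List.pyRange (k : Int) (n : Int) 100 := by
  have hrange : PySem.List.pyRange 0 (n : Int) 1 = (List.range n).map (fun m => ((m : Nat) : Int)) := by
    rw [PySem.List.pyRange_of_pos _ _ (by norm_num : (0:Int) < 1)]
    have : (if (0:Int) < (n:Int) then (((n:Int) - 0 + 1 - 1) / 1).toNat else 0) = n := by
      split_ifs <;> omega
    rw [this]
    apply List.map_congr_left
    intro j _
    omega
  rw [hrange, List.filter_map]
  have hcomp : ((fun i => pvKey i == pvKey (k : Int)) ∘ (fun m : Nat => ((m : Nat) : Int)))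
      = (fun m : Nat => decide (m % 100 = k)) := by
    funext m
    simp only [Function.comp_apply]
    by_cases h : m % 100 = k
    · have : pvKey ((m : Nat) : Int) = pvKey (k : Int) := by rw [pvKey_mod m, h]
      simp [this, h]
    · have hne : pvKey ((m : Nat) : Int) ≠ pvKey (k : Int) := by
        intro he
        rw [pvKey_mod m] at he
        have := pvKey_inj (by omega) hk he
        omega
      simp [hne, h]
  rw [hcomp, pv_filter_nat k n hk, pv_stride_eq k n, List.map_map]
  rfl

-- B's key for k ∈ [0, 100) is the canonical key
lemma pv_bkey_eq (k : Nat) (hk : k < 100) :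
    PySem.List.pyGetD pvLocations (PySem.Int.mod (k : Int) 10) "" ++ "_"
        ++ PySem.Int.toStr (PySem.Int.floordiv (k : Int) 10 + 1)
      = pvKey (k : Int) := by
  unfold pvKey
  congr 2
  rw [show ((10 : Int)) = ((10 : Nat) : Int) by norm_num,
      PySem.Int.floordiv_natCast, PySem.Int.mod_natCast]
  have : k / 10 % 10 = k / 10 := by omega
  rw [this]

-- keys of the canonical fold
lemma pv_keys (n : Nat) :
    ((PySem.List.pyRange 0 (n : Int)).foldl pvStepM PySem.Dict.empty).keys
      = (PySem.List.pyRange 0 (min (n : Int) 100)).map pvKey := by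
  unfold pvStepM
  rw [PySem.Dict.keys_foldl_modify_key (PySem.List.pyRange 0 (n : Int)) pvKey []
        (fun _ i => (fun l => l ++ [pvName i])) PySem.Dict.empty]
  rw [PySem.Dict.keys_empty, PySem.Set.update_nil_left, pv_keys_dedup]

-- value stored at the canonical key of k
lemma pv_getD (k n : Nat) (hk : k < 100) :
    ((PySem.List.pyRange 0 (n : Int)).foldl pvStepM PySem.Dict.empty).getD (pvKey (k : Int)) []
      = (PySem.List.pyRange (k : Int) (n : Int) 100).map pvName := by
  have hfold : (PySem.List.pyRange 0 (n : Int)).foldl pvStepM PySem.Dict.empty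
      = ((PySem.List.pyRange 0 (n : Int)).map (fun i => (pvKey i, pvName i))).foldl
          (fun d p => d.modify p.1 [] (fun l => l ++ [p.2])) PySem.Dict.empty := by
    rw [List.foldl_map]
    rfl
  rw [hfold, PySem.Dict.getD_foldl_modify_append, PySem.Dict.getD_empty, List.nil_append,
      List.filter_map, List.map_map]
  have : ((PySem.List.pyRange 0 (n : Int)).filter
      ((fun p : String × String => p.1 == pvKey (k : Int)) ∘ (fun i => (pvKey i, pvName i))))
      = (PySem.List.pyRange 0 (n : Int)).filter (fun i => pvKey i == pvKey (k : Int)) := rfl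
  rw [this, pv_filter_eq k n hk]
  rfl

-- ===== VERDICT (by name: the statement is the Claim_ definition above) =====
theorem init_tags_table_names_py_spec : Claim_equal_init_tags_table_names_py := by
  intro t _
  unfold Spec_init_tags_table_names_py init_tags_table_names_py init_tags_table_names_py_alt
  by_cases h : t ≤ 0
  · rw [pv_nonpos t h]
    have hmin : min t 100 ≤ 0 := by omega
    rw [pv_nonpos (min t 100) hmin]
    rfl
  · obtain ⟨n, rfl⟩ := Int.eq_ofNat_of_zero_le (by omega : 0 ≤ t)
    rw [pv_loopA n]
    -- B side: fresh distinct keys, so Dict.ofList's items are the list itself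
    have hkeysB : ((PySem.List.pyRange 0 (min (n : Int) 100)).map (fun k =>
        (PySem.List.pyGetD pvLocations (PySem.Int.mod k 10) "" ++ "_"
           ++ PySem.Int.toStr (PySem.Int.floordiv k 10 + 1),
         (PySem.List.pyRange k (n : Int) 100).map (fun i => "d" ++ PySem.Int.toStr i)))).map
        (fun p => p.1) = (PySem.List.pyRange 0 (min (n : Int) 100)).map pvKey := by
      rw [List.map_map]
      apply List.map_congr_left
      intro i hi
      have hib := PySem.List.mem_pyRange_one.mp hi
      obtain ⟨k, rfl⟩ := Int.eq_ofNat_of_zero_le hib.1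
      have hk : k < 100 := by have := hib.2; omega
      exact pv_bkey_eq k hk
    have hnodup : ((PySem.List.pyRange 0 (min (n : Int) 100)).map pvKey).Nodup := by
      rw [show PySem.List.pyRange 0 (min (n : Int) 100) 1
            = PySem.List.pyRange 0 (min (n : Int) 100) 1 from rfl]
      have : (PySem.List.pyRange 0 (min (n : Int) 100)).map pvKey
          = PySem.Set.ofList ((PySem.List.pyRange 0 (min (n : Int) 100).toNat).map pvKey) := by
        rw [pv_keys_dedup]
        congr 2
        omega
      rw [this]
      exact PySem.Set.nodup_ofList _
    have hB : (PySem.Dict.ofList ((PySem.List.pyRange 0 (min (n : Int) 100)).map (fun k =>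
        (PySem.List.pyGetD pvLocations (PySem.Int.mod k 10) "" ++ "_"
           ++ PySem.Int.toStr (PySem.Int.floordiv k 10 + 1),
         (PySem.List.pyRange k (n : Int) 100).map (fun i => "d" ++ PySem.Int.toStr i))))).items
        = (PySem.List.pyRange 0 (min (n : Int) 100)).map (fun k =>
        (PySem.List.pyGetD pvLocations (PySem.Int.mod k 10) "" ++ "_"
           ++ PySem.Int.toStr (PySem.Int.floordiv k 10 + 1),
         (PySem.List.pyRange k (n : Int) 100).map (fun i => "d" ++ PySem.Int.toStr i))) := by
      unfold PySem.Dict.ofList PySem.Dict.update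
      have h := PySem.Dict.items_foldl_insert_fresh
          ((PySem.List.pyRange 0 (min (n : Int) 100)).map (fun k =>
            (PySem.List.pyGetD pvLocations (PySem.Int.mod k 10) "" ++ "_"
               ++ PySem.Int.toStr (PySem.Int.floordiv k 10 + 1),
             (PySem.List.pyRange k (n : Int) 100).map (fun i => "d" ++ PySem.Int.toStr i))))
          (fun p => p.1) (fun p => p.2) PySem.Dict.empty
          (by intro a _; simp [pysem])
          (by rw [hkeysB]; exact hnodup)
      simpa using h
    rw [hB]
    -- A side: items = keys mapped to their stored values
    rw [PySem.Dict.items_eq_map_keys _ (by rw [pv_keys]; exact hnodup) [], pv_keys,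
        List.map_map]
    apply List.map_congr_left
    intro i hi
    have hib := PySem.List.mem_pyRange_one.mp hi
    obtain ⟨k, rfl⟩ := Int.eq_ofNat_of_zero_le hib.1
    have hk : k < 100 := by have := hib.2; omega
    simp only [Function.comp_apply]
    rw [pv_getD k n hk, pv_bkey_eq k hk]
    rfl
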